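-- pv_equiv track=rewrite | github.com/Avinash0422/allocation_calculation | allocation.py | generate_tag_logic
-- ===== SOURCE A (Python) =====
-- def generate_tag_logic(max_tag=34):
--     """Generate tag_logic dictionary dynamically up to max_tag, extrapolating beyond tag 25."""
--     tag_logic = {
--         1:  [1, 0, 0, 0, 0],
--         2:  [1, 1, 0, 0, 0],
--         3:  [1, 1, 1, 0, 0],
--         4:  [1, 1, 1, 1, 0],
--         5:  [1, 1, 1, 1, 1],
--         6:  [2, 1, 1, 1, 1],
--         7:  [2, 2, 1, 1, 1],
--         8:  [2, 2, 2, 1, 1],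
--         9:  [2, 2, 2, 2, 1],
--         10: [2, 2, 2, 2, 2],
--         11: [3, 2, 2, 2, 2],
--         12: [3, 3, 2, 2, 2],
--         13: [3, 3, 3, 2, 2],
--         14: [3, 3, 3, 3, 2],
--         15: [3, 3, 3, 3, 3],
--         16: [4, 3, 3, 3, 3],
--         17: [4, 4, 3, 3, 3],
--         18: [4, 4, 4, 3, 3],
--         19: [4, 4, 4, 4, 3],
--         20: [4, 4, 4, 4, 4],
--         21: [5, 4, 4, 4, 4],
--         22: [5, 5, 4, 4, 4],
--         23: [5, 5, 5, 4, 4],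
--         24: [5, 5, 5, 5, 4],
--         25: [5, 5, 5, 5, 5]
--     }
--     if max_tag >= 26:
--         tag_logic.update({tag: [5, 5, 5, 5, 5] for tag in range(26, max_tag + 1)})
--     return tag_logic
-- ===== SOURCE B (Python) =====
-- def generate_tag_logic(max_tag=34):
--     """Closed-form: tag n's row is [min(5, (n + 4 - i) // 5) for i in range(5)]."""
--     return {n: [min(5, (n + 4 - i) // 5) for i in range(5)]
--             for n in range(1, max(25, max_tag) + 1)}
-- ===== Notes on version B (the rewrite author's own statement) =====
-- stated objective: simpler
-- what changed: Replaces the hardcoded 25-row table plus conditional update loop with a single dict comprehension over range(1, max(25, max_tag)+1) whose row is the closed form [min(5, (n+4-i)//5) for i in range(5)].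
import Mathlib
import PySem

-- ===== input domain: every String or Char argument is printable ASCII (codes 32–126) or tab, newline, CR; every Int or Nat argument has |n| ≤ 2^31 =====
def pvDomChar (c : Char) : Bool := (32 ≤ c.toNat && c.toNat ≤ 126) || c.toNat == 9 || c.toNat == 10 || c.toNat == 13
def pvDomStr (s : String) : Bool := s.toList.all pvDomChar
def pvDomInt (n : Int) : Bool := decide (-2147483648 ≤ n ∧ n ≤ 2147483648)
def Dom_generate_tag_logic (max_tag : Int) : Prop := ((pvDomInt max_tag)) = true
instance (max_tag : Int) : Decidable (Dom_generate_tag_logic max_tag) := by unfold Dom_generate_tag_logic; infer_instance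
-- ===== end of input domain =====

-- B replaces A's hardcoded 25-row table plus update loop by a single comprehension with the
-- closed-form row [min(5, (n+4-i)//5) for i in range(5)] over range(1, max(25, max_tag)+1)
-- (objective: simpler).

-- ===== PORT A =====
-- A's hardcoded dict literal (the first assignment of A's body).
def pvATable : PySem.Dict Int (List Int) := PySem.Dict.ofList
  [ (1,  [1, 0, 0, 0, 0]),
    (2,  [1, 1, 0, 0, 0]),
    (3,  [1, 1, 1, 0, 0]),
    (4,  [1, 1, 1, 1, 0]),
    (5,  [1, 1, 1, 1, 1]),
    (6,  [2, 1, 1, 1, 1]),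
    (7,  [2, 2, 1, 1, 1]),
    (8,  [2, 2, 2, 1, 1]),
    (9,  [2, 2, 2, 2, 1]),
    (10, [2, 2, 2, 2, 2]),
    (11, [3, 2, 2, 2, 2]),
    (12, [3, 3, 2, 2, 2]),
    (13, [3, 3, 3, 2, 2]),
    (14, [3, 3, 3, 3, 2]),
    (15, [3, 3, 3, 3, 3]),
    (16, [4, 3, 3, 3, 3]),
    (17, [4, 4, 3, 3, 3]),
    (18, [4, 4, 4, 3, 3]),
    (19, [4, 4, 4, 4, 3]),
    (20, [4, 4, 4, 4, 4]),
    (21, [5, 4, 4, 4, 4]),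
    (22, [5, 5, 4, 4, 4]),
    (23, [5, 5, 5, 4, 4]),
    (24, [5, 5, 5, 5, 4]),
    (25, [5, 5, 5, 5, 5]) ]

def generate_tag_logic (max_tag : Int) : List (Int × List Int) :=
  (if max_tag ≥ 26 then
      pvATable.update ((PySem.List.pyRange 26 (max_tag + 1) 1).map
        (fun tag => (tag, ([5, 5, 5, 5, 5] : List Int))))
    else pvATable).items

-- ===== PORT B =====
def generate_tag_logic_alt (max_tag : Int) : List (Int × List Int) :=
  (PySem.List.pyRange 1 (max 25 max_tag + 1) 1).map
    (fun n => (n, (PySem.List.pyRange 0 5 1).map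
      (fun i => min 5 (PySem.Int.floordiv (n + 4 - i) 5))))

-- ===== PRECONDITION & SPEC =====
def Spec_generate_tag_logic (max_tag : Int) (out : List (Int × List Int)) : Prop := out = generate_tag_logic_alt max_tag
instance (max_tag : Int) (out : List (Int × List Int)) : Decidable (Spec_generate_tag_logic max_tag out) := by unfold Spec_generate_tag_logic; infer_instance

-- ===== CLAIM (what is proved, stated in full; the proofs are below) =====
def Claim_equal_generate_tag_logic : Prop := ∀ (max_tag : Int), Dom_generate_tag_logic max_tag → Spec_generate_tag_logic max_tag (generate_tag_logic max_tag)

-- ===== LEMMAS AND PROOFS =====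

-- B's closed-form row is all fives for every tag from 26 on.
lemma row_alt_ge26 (n : Int) (hn : 26 ≤ n) :
    (PySem.List.pyRange 0 5 1).map (fun i => min 5 (PySem.Int.floordiv (n + 4 - i) 5))
      = ([5, 5, 5, 5, 5] : List Int) := by
  have hrange : PySem.List.pyRange 0 5 1 = [0, 1, 2, 3, 4] := by decide
  rw [hrange]
  have h5 : ∀ i : Int, i ≤ 4 → min 5 (PySem.Int.floordiv (n + 4 - i) 5) = 5 := by
    intro i hi
    have : (5 : Int) ≤ PySem.Int.floordiv (n + 4 - i) 5 :=
      (PySem.Int.le_floordiv_iff_mul_le (by omega)).mpr (by omega)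
    omega
  simp only [List.map]
  rw [h5 0 (by omega), h5 1 (by omega), h5 2 (by omega), h5 3 (by omega), h5 4 (by omega)]

-- A's fixed table's items equal B's comprehension over 1..25.
lemma base_items_eq :
    pvATable.items
      = (PySem.List.pyRange 1 26 1).map
          (fun n => (n, (PySem.List.pyRange 0 5 1).map
            (fun i => min 5 (PySem.Int.floordiv (n + 4 - i) 5)))) := by
  decide

-- On max_tag ≤ 25 both sides are the fixed 25-row table.
lemma equal_of_le25 (max_tag : Int) (h : max_tag ≤ 25) :
    generate_tag_logic max_tag = generate_tag_logic_alt max_tag := by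
  unfold generate_tag_logic generate_tag_logic_alt
  rw [if_neg (by omega : ¬ max_tag ≥ 26), max_eq_left h]
  exact base_items_eq

-- On max_tag ≥ 26: A's update appends the fresh keys 26..max_tag; B's range splits at 26.
lemma equal_of_ge26 (max_tag : Int) (h : 26 ≤ max_tag) :
    generate_tag_logic max_tag = generate_tag_logic_alt max_tag := by
  have hkeys : pvATable.keys
      = [1, 2, 3, 4, 5, 6, 7, 8, 9, 10, 11, 12, 13, 14, 15, 16, 17, 18, 19, 20,
         21, 22, 23, 24, 25] := by decide
  have hfresh : ∀ p ∈ (PySem.List.pyRange 26 (max_tag + 1) 1).map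
      (fun tag => (tag, ([5, 5, 5, 5, 5] : List Int))),
      pvATable.contains p.1 = false := by
    intro p hp
    rcases List.mem_map.mp hp with ⟨t, ht, rfl⟩
    have h26 : 26 ≤ t := ((PySem.List.mem_pyRange_one).mp ht).1
    rw [PySem.Dict.contains_eq_decide_mem_keys, hkeys]
    simp only [List.mem_cons, List.not_mem_nil, decide_eq_false_iff_not, or_false]
    omega
  have hnodup : ((PySem.List.pyRange 26 (max_tag + 1) 1).map
      (fun tag => (tag, ([5, 5, 5, 5, 5] : List Int)))).map Prod.fst |>.Nodup := by
    simp only [List.map_map]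
    have : (Prod.fst ∘ fun tag : Int => (tag, ([5, 5, 5, 5, 5] : List Int))) = id := rfl
    rw [this, List.map_id]
    exact PySem.List.nodup_pyRange_one 26 (max_tag + 1)
  unfold generate_tag_logic
  rw [if_pos (by omega : max_tag ≥ 26)]
  unfold PySem.Dict.update
  rw [PySem.Dict.items_foldl_insert_fresh _ Prod.fst Prod.snd _ hfresh hnodup]
  unfold generate_tag_logic_alt
  rw [max_eq_right (by omega : (25:Int) ≤ max_tag),
      PySem.List.pyRange_one_append 1 26 (max_tag + 1) (by omega) (by omega),
      List.map_append, base_items_eq]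
  congr 1
  rw [List.map_map]
  refine List.map_congr_left ?_
  intro t ht
  have h26 : 26 ≤ t := ((PySem.List.mem_pyRange_one).mp ht).1
  simp only [Function.comp_apply, row_alt_ge26 t h26]

-- ===== VERDICT (by name: the statement is the Claim_ definition above) =====
theorem generate_tag_logic_spec : Claim_equal_generate_tag_logic := by
  intro max_tag _
  unfold Spec_generate_tag_logic
  by_cases h : max_tag ≤ 25
  · exact equal_of_le25 max_tag h
  · exact equal_of_ge26 max_tag (by omega)
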